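-- pv_equiv track=rewrite | github.com/ehdgua01/Algorithms | coding_test/programmers/graph/count_room.py | solution
-- ===== SOURCE A (Python) =====
-- from collections import defaultdict
--
-- x_distances = [0, 1, 1, 1, 0, -1, -1, -1]
--
-- y_distances = [1, 1, 0, -1, -1, -1, 0, 1]
--
-- def move(pos, arrow):
--     x, y = pos
--     return x + x_distances[arrow], y + y_distances[arrow]
--
-- def solution(arrows):
--     graph = defaultdict(list)
--     pos = 0, 0
--     graph[pos] = []
--     answer = 0
--     for arrow in arrows:
--         for _ in range(2):
--             next_pos = move(pos, arrow)
--             visited = next_pos in graph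
--             new_edge = pos not in graph[next_pos]
--             if visited and new_edge:
--                 graph[pos].append(next_pos)
--                 graph[next_pos].append(pos)
--                 answer += 1
--             elif new_edge:
--                 graph[pos].append(next_pos)
--                 graph[next_pos].append(pos)
--             pos = next_pos
--     return answer
-- ===== SOURCE B (Python) =====
-- x_distances = [0, 1, 1, 1, 0, -1, -1, -1]
--
-- y_distances = [1, 1, 0, -1, -1, -1, 0, 1]
--
-- def move(pos, arrow):
--     x, y = pos
--     return x + x_distances[arrow], y + y_distances[arrow]
--
-- def solution(arrows):
--     pos = (0, 0)
--     vertices = {pos}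
--     edges = set()
--     for arrow in arrows:
--         for _ in range(2):
--             next_pos = move(pos, arrow)
--             vertices.add(next_pos)
--             edges.add(frozenset((pos, next_pos)))
--             pos = next_pos
--     return len(edges) - len(vertices) + 1
-- ===== Notes on version B (the rewrite author's own statement) =====
-- stated objective: simpler
-- what changed: B drops A's adjacency-list defaultdict and per-step room counting; it collects the visited-vertex set and the undirected-edge set during the same walk and returns len(edges) - len(vertices) + 1 once at the end (Euler's formula for the connected walk graph).
import Mathlib
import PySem

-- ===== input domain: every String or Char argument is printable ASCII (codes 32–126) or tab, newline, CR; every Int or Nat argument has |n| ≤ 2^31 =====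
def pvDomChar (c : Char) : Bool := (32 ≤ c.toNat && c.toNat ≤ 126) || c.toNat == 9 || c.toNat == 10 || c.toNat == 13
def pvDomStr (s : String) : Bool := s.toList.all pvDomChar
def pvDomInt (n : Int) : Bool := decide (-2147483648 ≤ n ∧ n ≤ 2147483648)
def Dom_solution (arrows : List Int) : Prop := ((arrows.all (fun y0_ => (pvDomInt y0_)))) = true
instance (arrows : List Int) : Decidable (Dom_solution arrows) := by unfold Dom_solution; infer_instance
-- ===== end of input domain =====

-- B replaces A's per-step room counting by collecting the visited-vertex set and the
-- undirected-edge set during the same walk and returning |E| - |V| + 1 once at the end (objective: simpler).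

-- ===== PORT A =====
def xDistances : List Int := [0, 1, 1, 1, 0, -1, -1, -1]
def yDistances : List Int := [1, 1, 0, -1, -1, -1, 0, 1]

-- x_distances[arrow] raises IndexError outside [-8,8); Pre_solution excludes that, the default 0 is never used there
def move (pos : Int × Int) (arrow : Int) : Int × Int :=
  (pos.1 + PySem.List.pyGetD xDistances arrow 0, pos.2 + PySem.List.pyGetD yDistances arrow 0)

-- one iteration of A's inner `for _ in range(2)` body; state = (graph, pos, answer).
-- `graph[next_pos]` on a defaultdict materialises the key, hence the unconditional `insert next adjN`.
def stepA (s : PySem.Dict (Int × Int) (List (Int × Int)) × (Int × Int) × Int) (arrow : Int) :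
    PySem.Dict (Int × Int) (List (Int × Int)) × (Int × Int) × Int :=
  let g := s.1
  let pos := s.2.1
  let next := move pos arrow
  let visited : Bool := g.contains next
  let adjN := g.getD next []
  let g1 := g.insert next adjN
  let newEdge : Bool := !(decide (pos ∈ adjN))
  if visited && newEdge then
    let g2 := g1.insert pos ((g1.getD pos []) ++ [next])
    let g3 := g2.insert next ((g2.getD next []) ++ [pos])
    (g3, next, s.2.2 + 1)
  else if newEdge then
    let g2 := g1.insert pos ((g1.getD pos []) ++ [next])
    let g3 := g2.insert next ((g2.getD next []) ++ [pos])
    (g3, next, s.2.2)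
  else
    (g1, next, s.2.2)

def solution (arrows : List Int) : Int :=
  let init := (PySem.Dict.insert PySem.Dict.empty ((0 : Int), (0 : Int)) ([] : List (Int × Int)),
               ((0 : Int), (0 : Int)), (0 : Int))
  (arrows.foldl (fun s a => stepA (stepA s a) a) init).2.2

-- ===== PORT B =====
-- frozenset({p, q}) represented canonically as the lexicographically ordered pair
def ekey (p q : Int × Int) : (Int × Int) × (Int × Int) :=
  if p.1 < q.1 ∨ (p.1 = q.1 ∧ p.2 ≤ q.2) then (p, q) else (q, p)

-- one half-step of B's walk; state = (vertices, edges, pos)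
def stepB (t : PySem.Set (Int × Int) × PySem.Set ((Int × Int) × (Int × Int)) × (Int × Int)) (arrow : Int) :
    PySem.Set (Int × Int) × PySem.Set ((Int × Int) × (Int × Int)) × (Int × Int) :=
  let pos := t.2.2
  let next := move pos arrow
  (PySem.Set.add t.1 next, PySem.Set.add t.2.1 (ekey pos next), next)

def solution_alt (arrows : List Int) : Int :=
  let init := (PySem.Set.add PySem.Set.empty ((0 : Int), (0 : Int)),
               (PySem.Set.empty : PySem.Set ((Int × Int) × (Int × Int))),
               ((0 : Int), (0 : Int)))
  let fin := arrows.foldl (fun t a => stepB (stepB t a) a) init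
  (fin.2.1.length : Int) - (fin.1.length : Int) + 1

-- ===== PRECONDITION & SPEC =====
-- Pre_ excludes exactly the arrows outside [-8, 8), on which Python's x_distances[arrow] raises IndexError.
def Pre_solution (arrows : List Int) : Prop := ∀ a ∈ arrows, -8 ≤ a ∧ a < 8
instance (arrows : List Int) : Decidable (Pre_solution arrows) := by unfold Pre_solution; infer_instance

def pvWitness_solution : List Int := [6, 6, 6, 4, 4, 4, 2, 2, 2, 0, 0, 0, 1, 6, 5, 5, 3, 6, 0]

def Spec_solution (arrows : List Int) (out : Int) : Prop := out = solution_alt arrows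
instance (arrows : List Int) (out : Int) : Decidable (Spec_solution arrows out) := by unfold Spec_solution; infer_instance

-- ===== CLAIM (what is proved, stated in full; the proofs are below) =====
def Claim_equal_solution : Prop := ∀ (arrows : List Int), Dom_solution arrows → Pre_solution arrows → Spec_solution arrows (solution arrows)

-- ===== LEMMAS AND PROOFS =====

-- coupling invariant between A's state (g, pos, ans) and B's state (V, E, pos)
def CoupleInv (s : PySem.Dict (Int × Int) (List (Int × Int)) × (Int × Int) × Int)
    (t : PySem.Set (Int × Int) × PySem.Set ((Int × Int) × (Int × Int)) × (Int × Int)) : Prop :=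
  s.2.1 = t.2.2 ∧
  (∀ q, s.1.contains q = true ↔ q ∈ t.1) ∧
  (∀ p q, p ∈ s.1.getD q [] ↔ ekey p q ∈ t.2.1) ∧
  s.2.2 = (t.2.1.length : Int) - (t.1.length : Int) + 1 ∧
  s.1.contains s.2.1 = true

lemma ekey_eq_iff (p q r s : Int × Int) :
    ekey p q = ekey r s ↔ (p = r ∧ q = s) ∨ (p = s ∧ q = r) := by
  obtain ⟨p1, p2⟩ := p; obtain ⟨q1, q2⟩ := q; obtain ⟨r1, r2⟩ := r; obtain ⟨s1, s2⟩ := s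
  simp only [ekey, Prod.mk.injEq]
  split_ifs <;> constructor <;> intro h <;> simp_all <;> omega

lemma Inv_step (s : PySem.Dict (Int × Int) (List (Int × Int)) × (Int × Int) × Int)
    (t : PySem.Set (Int × Int) × PySem.Set ((Int × Int) × (Int × Int)) × (Int × Int))
    (a : Int) (h : CoupleInv s t) : CoupleInv (stepA s a) (stepB t a) := by
  obtain ⟨g, pos, ans⟩ := s
  obtain ⟨V, E, pos2⟩ := t
  obtain ⟨hpos, hI1, hI2, hI3, hI4⟩ := h
  dsimp only at hpos hI1 hI2 hI3 hI4
  subst hpos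
  simp only [stepA, stepB]
  set next := move pos a with hnext
  clear_value next
  clear hnext
  by_cases he : pos ∈ g.getD next []
  · -- the edge is already recorded: A changes nothing but the defaultdict key, B's sets absorb
    have hv : g.contains next = true := by
      by_contra hc
      have h0 : g.getD next [] = [] :=
        PySem.Dict.getD_of_not_contains _ _ (by simpa using hc)
      rw [h0] at he
      exact (List.not_mem_nil) he
    have hkeyE : ekey pos next ∈ E := (hI2 pos next).mp he
    have hnextV : next ∈ V := (hI1 next).mp hv
    simp only [he, decide_true, Bool.not_true, Bool.and_false, if_false, Bool.false_eq_true]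
    rw [PySem.Set.add_of_mem hkeyE, PySem.Set.add_of_mem hnextV]
    refine ⟨rfl, ?_, ?_, hI3, PySem.Dict.contains_insert_self _ _ _⟩
    · intro q
      rw [PySem.Dict.contains_insert]
      simp only [Bool.or_eq_true, beq_iff_eq, hI1 q]
      constructor
      · rintro (rfl | hq)
        · exact hnextV
        · exact hq
      · exact Or.inr
    · intro p q
      rw [PySem.Dict.getD_insert]
      split_ifs with hq
      · subst hq; exact hI2 p q
      · exact hI2 p q
  · -- a new edge is drawn: A counts a room iff next_pos was visited; B gains one edge,
    -- and one vertex exactly when next_pos was unvisited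
    have hkeyNot : ekey pos next ∉ E := fun hk => he ((hI2 pos next).mpr hk)
    have hlenE : (PySem.Set.add E (ekey pos next)).length = E.length + 1 := by
      rw [PySem.Set.add_of_not_mem hkeyNot, List.length_append]
      rfl
    have hposV : pos ∈ V := (hI1 pos).mp hI4
    -- the resulting graph is the same in both counting branches
    have hGraph : ∀ q,
        (((g.insert next (g.getD next [])).insert pos
            (((g.insert next (g.getD next [])).getD pos []) ++ [next])).insert next
            ((((g.insert next (g.getD next [])).insert pos
              (((g.insert next (g.getD next [])).getD pos []) ++ [next])).getD next []) ++ [pos])).contains q = true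
          ↔ q ∈ PySem.Set.add V next := by
      intro q
      rw [PySem.Set.mem_add]
      simp only [PySem.Dict.contains_insert, Bool.or_eq_true, beq_iff_eq, hI1 q]
      constructor
      · rintro (rfl | rfl | rfl | hq)
        · exact Or.inr rfl
        · exact Or.inl hposV
        · exact Or.inr rfl
        · exact Or.inl hq
      · rintro (hq | rfl)
        · exact Or.inr (Or.inr (Or.inr hq))
        · exact Or.inl rfl
    have hEdges : ∀ p q,
        p ∈ (((g.insert next (g.getD next [])).insert pos
            (((g.insert next (g.getD next [])).getD pos []) ++ [next])).insert next
            ((((g.insert next (g.getD next [])).insert pos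
              (((g.insert next (g.getD next [])).getD pos []) ++ [next])).getD next []) ++ [pos])).getD q []
          ↔ ekey p q ∈ PySem.Set.add E (ekey pos next) := by
      intro p q
      rw [PySem.Set.mem_add]
      by_cases hpn : pos = next
      · subst hpn
        by_cases hq : q = pos
        · subst hq
          simp [hI2, ekey_eq_iff]
        · simp [PySem.Dict.getD_insert, hq, hI2, ekey_eq_iff]
      · have hnp : ¬ next = pos := fun hh => hpn hh.symm
        by_cases hq1 : q = next
        · subst hq1
          simp [PySem.Dict.getD_insert, hnp, hpn, hI2, ekey_eq_iff]
        · by_cases hq2 : q = pos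
          · subst hq2
            simp [PySem.Dict.getD_insert, hq1, hnp, hI2, ekey_eq_iff]
          · simp [PySem.Dict.getD_insert, hq1, hq2, hI2, ekey_eq_iff]
    by_cases hv : g.contains next = true
    · have hnextV : next ∈ V := (hI1 next).mp hv
      have hlenV : (PySem.Set.add V next).length = V.length := by
        rw [PySem.Set.add_of_mem hnextV]
      simp only [he, decide_false, Bool.not_false, hv, Bool.and_true, if_true]
      refine ⟨rfl, hGraph, hEdges, ?_, PySem.Dict.contains_insert_self _ _ _⟩
      rw [hlenE, hlenV, hI3]
      push_cast
      ring
    · have hnextV : next ∉ V := fun hq => hv ((hI1 next).mpr hq)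
      have hlenV : (PySem.Set.add V next).length = V.length + 1 := by
        rw [PySem.Set.add_of_not_mem hnextV, List.length_append]
        rfl
      simp only [he, decide_false, Bool.not_false, hv, Bool.and_true,
        Bool.false_eq_true, if_false, if_true]
      refine ⟨rfl, hGraph, hEdges, ?_, PySem.Dict.contains_insert_self _ _ _⟩
      rw [hlenE, hlenV, hI3]
      push_cast
      ring

lemma Inv_fold (arrows : List Int)
    (s : PySem.Dict (Int × Int) (List (Int × Int)) × (Int × Int) × Int)
    (t : PySem.Set (Int × Int) × PySem.Set ((Int × Int) × (Int × Int)) × (Int × Int))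
    (h : CoupleInv s t) :
    CoupleInv (arrows.foldl (fun s a => stepA (stepA s a) a) s)
        (arrows.foldl (fun t a => stepB (stepB t a) a) t) := by
  induction arrows generalizing s t with
  | nil => exact h
  | cons a rest ih => exact ih _ _ (Inv_step _ _ _ (Inv_step _ _ _ h))

-- ===== VERDICT (by name: the statement is the Claim_ definition above) =====
theorem solution_spec : Claim_equal_solution := by
  intro arrows _ _
  show solution arrows = solution_alt arrows
  have h0 : CoupleInv (PySem.Dict.insert PySem.Dict.empty ((0 : Int), (0 : Int)) ([] : List (Int × Int)),
               ((0 : Int), (0 : Int)), (0 : Int))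
      (PySem.Set.add PySem.Set.empty ((0 : Int), (0 : Int)),
       (PySem.Set.empty : PySem.Set ((Int × Int) × (Int × Int))),
       ((0 : Int), (0 : Int))) := by
    refine ⟨rfl, ?_, ?_, by decide, by decide⟩
    · intro q
      rw [PySem.Set.mem_add]
      simp [PySem.Dict.contains_insert, PySem.Dict.contains_empty]
    · intro p q
      simp [PySem.Dict.getD_insert, PySem.Set.empty, PySem.Dict.getD_empty]
  have hfin := Inv_fold arrows _ _ h0
  obtain ⟨-, -, -, hans, -⟩ := hfin
  simpa [solution, solution_alt] using hans
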